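-- pv_equiv track=rewrite | github.com/pypi-data/pypi-mirror-398 | packages/seven2one-questra-data/seven2one_questra_data-0.8.1.tar.gz/seven2one_questra_data-0.8.1/src/seven2one/questra/data/operations/dynamic_inventory.py | _build_nested_field_selection
-- ===== SOURCE A (Python) =====
-- def _normalize_name(name: str) -> str:
--     """
--     Normalize names for GraphQL field names.
--
--     Converts names like 'TestNamespace' to 'testNamespace'.
--
--     Args:
--         name: Name to normalize
--
--     Returns:
--         str: Normalized name
--     """
--     if not name:
--         return name
--     return name[0].lower() + name[1:]
--
-- def _build_nested_field_selection(property_name: str) -> str: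
--     """
--     Convert dot notation property to nested GraphQL field syntax.
--
--     Args:
--         property_name: Property name with optional dot notation
--
--     Returns:
--         GraphQL field selection string
--     """
--     parts = property_name.split(".")
--     if len(parts) == 1:
--         # Einfache Property without Verschachtelung
--         return _normalize_name(parts[0])
--
--     # Verschachtelte Property - baue rekursiv GraphQL fields auf
--     normalized_parts = [_normalize_name(p) for p in parts]
--     result = normalized_parts[0]
--     for part in normalized_parts[1:]:
--         result = f"{result} {{ {part}"
--     result += " }" * (len(parts) - 1)
--     return result
-- ===== SOURCE B (Python) =====
-- def _normalize_name(name: str) -> str: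
--     if not name:
--         return name
--     return name[0].lower() + name[1:]
--
--
-- def _build_nested_field_selection(property_name: str) -> str:
--     def rec(parts):
--         if len(parts) == 1:
--             return _normalize_name(parts[0])
--         return _normalize_name(parts[0]) + " { " + rec(parts[1:]) + " }"
--
--     return rec(property_name.split("."))
-- ===== Notes on version B (the rewrite author's own statement) =====
-- stated objective: simpler
-- what changed: Replaces A's accumulate-left loop plus a separately counted repeated closing-brace tail with a single right-recursion over the dot-split parts that wraps each nested level in its brace delimiters directly.
import Mathlib
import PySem

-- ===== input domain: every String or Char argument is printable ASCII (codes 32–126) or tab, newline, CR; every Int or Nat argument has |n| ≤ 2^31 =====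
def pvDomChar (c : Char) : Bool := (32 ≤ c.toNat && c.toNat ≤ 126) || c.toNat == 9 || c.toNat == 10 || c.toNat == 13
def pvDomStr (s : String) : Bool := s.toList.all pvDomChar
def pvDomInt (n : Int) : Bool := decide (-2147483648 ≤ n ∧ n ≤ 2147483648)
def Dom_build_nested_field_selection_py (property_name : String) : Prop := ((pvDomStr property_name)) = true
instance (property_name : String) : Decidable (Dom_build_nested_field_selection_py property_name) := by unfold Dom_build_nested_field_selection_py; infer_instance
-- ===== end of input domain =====

-- B replaces A's accumulate-left loop plus a counted repeated closing-brace tail by one right-recursion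
-- over the dot-split parts that wraps each level directly (objective: simpler).

-- ===== PORT A =====
-- _normalize_name: '' stays '', otherwise name[0].lower() + name[1:]  (shared helper of both Pythons)
def normalizeNameChars : List Char → List Char
  | [] => []
  | c :: t => PySem.Chars.lowerChar c :: t

-- literal transliteration of A on the code-point list
def buildNestedA (s : List Char) : List Char :=
  let parts := PySem.Chars.splitOn s ['.']
  if parts.length = 1 then
    normalizeNameChars (parts.headD [])
  else
    let normalized := parts.map normalizeNameChars
    let result := normalized.headD []
    let result := (normalized.drop 1).foldl (fun r p => r ++ [' ', '{', ' '] ++ p) result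
    result ++ (List.replicate (parts.length - 1) [' ', '}']).flatten

def build_nested_field_selection_py (property_name : String) : String :=
  String.ofList (buildNestedA property_name.toList)

-- ===== PORT B =====
-- Source B's rec: single part → normalized; otherwise head ++ " { " ++ rec tail ++ " }"
def buildNestedB : List (List Char) → List Char
  | [] => []
  | [p] => normalizeNameChars p
  | p :: q :: t => normalizeNameChars p ++ [' ', '{', ' '] ++ buildNestedB (q :: t) ++ [' ', '}']

def build_nested_field_selection_py_alt (property_name : String) : String :=
  String.ofList (buildNestedB (PySem.Chars.splitOn property_name.toList ['.']))

-- ===== PRECONDITION & SPEC =====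
def Spec_build_nested_field_selection_py (property_name : String) (out : String) : Prop := out = build_nested_field_selection_py_alt property_name
instance (property_name : String) (out : String) : Decidable (Spec_build_nested_field_selection_py property_name out) := by unfold Spec_build_nested_field_selection_py; infer_instance

-- ===== CLAIM (what is proved, stated in full; the proofs are below) =====
def Claim_equal_build_nested_field_selection_py : Prop := ∀ (property_name : String), Dom_build_nested_field_selection_py property_name → Spec_build_nested_field_selection_py property_name (build_nested_field_selection_py property_name)

-- ===== LEMMAS AND PROOFS =====

-- B's recursion, re-rooted at an arbitrary already-built prefix x
def buildAux (x : List Char) : List (List Char) → List Char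
  | [] => x
  | p :: t => x ++ [' ', '{', ' '] ++ buildAux (normalizeNameChars p) t ++ [' ', '}']

theorem buildAux_append (a b : List Char) (l : List (List Char)) :
    buildAux (a ++ b) l = a ++ buildAux b l := by
  cases l with
  | nil => rfl
  | cons p t => simp [buildAux, List.append_assoc]

theorem buildNestedB_cons (p : List Char) (t : List (List Char)) :
    buildNestedB (p :: t) = buildAux (normalizeNameChars p) t := by
  induction t generalizing p with
  | nil => rfl
  | cons q t ih => simp [buildNestedB, buildAux, ih]

theorem foldl_braces (l : List (List Char)) (x : List Char) :
    (l.map normalizeNameChars).foldl (fun r p => r ++ [' ', '{', ' '] ++ p) x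
      ++ (List.replicate l.length [' ', '}']).flatten = buildAux x l := by
  induction l generalizing x with
  | nil => simp [buildAux]
  | cons p t ih =>
    simp only [List.map_cons, List.foldl_cons, List.length_cons, List.replicate_succ',
      List.flatten_append, List.flatten_cons, List.flatten_nil, List.append_nil,
      ← List.append_assoc]
    rw [List.append_assoc x, ih, buildAux_append]
    rw [buildAux_append]
    simp [buildAux, List.append_assoc]

theorem buildNested_eq (s : List Char) : buildNestedA s = buildNestedB (PySem.Chars.splitOn s ['.']) := by
  unfold buildNestedA
  cases h : PySem.Chars.splitOn s ['.'] with
  | nil => simp [buildNestedB]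
  | cons p t =>
    cases t with
    | nil => simp [buildNestedB]
    | cons q t =>
      have hlen : (p :: q :: t).length ≠ 1 := by simp
      simp only [List.headD_cons, List.map_cons, List.drop_succ_cons,
        List.drop_zero, List.length_cons, Nat.add_sub_cancel]
      rw [buildNestedB_cons, ← foldl_braces (q :: t) (normalizeNameChars p)]
      simp

-- ===== VERDICT (by name: the statement is the Claim_ definition above) =====
theorem build_nested_field_selection_py_spec : Claim_equal_build_nested_field_selection_py := by
  intro s _
  unfold Spec_build_nested_field_selection_py build_nested_field_selection_py build_nested_field_selection_py_alt
  rw [buildNested_eq]
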